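-- pv_equiv track=rewrite | github.com/ImtaeZ/Chula-Course | ComProg/Grader/Part-III/Bidding.py | mul_winner
-- ===== SOURCE A (Python) =====
-- def mul_winner(bidding, p): # [(1,w),(1,a),(2,b)]
--     max_price = sorted(bidding[p])[::-1]
--     max_price = max_price[0][0]
--     bp = bidding[p]
--     winners = []
--     for i in range(len(bp)):
--         if bp[i][0] == max_price:
--             winners.append((bp[i][0],bp[i][1],p))
--     if len(winners) > 1:
--         return winners[0]
--     else:
--         return winners[0]
-- ===== SOURCE B (Python) =====
-- def mul_winner(bidding, p):
--     # Linear max-find plus first-match scan instead of sort+filter; same earliest-highest tuple.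
--     bp = bidding[p]
--     best = bp[0][0]
--     for price, _name in bp:
--         if price > best:
--             best = price
--     for price, name in bp:
--         if price == best:
--             return (price, name, p)
-- ===== Notes on version B (the rewrite author's own statement) =====
-- stated objective: faster
-- what changed: Replaced sort-the-bids-then-filter-all-maxima with a single linear max-find pass followed by a first-match scan that returns immediately.
import Mathlib
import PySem

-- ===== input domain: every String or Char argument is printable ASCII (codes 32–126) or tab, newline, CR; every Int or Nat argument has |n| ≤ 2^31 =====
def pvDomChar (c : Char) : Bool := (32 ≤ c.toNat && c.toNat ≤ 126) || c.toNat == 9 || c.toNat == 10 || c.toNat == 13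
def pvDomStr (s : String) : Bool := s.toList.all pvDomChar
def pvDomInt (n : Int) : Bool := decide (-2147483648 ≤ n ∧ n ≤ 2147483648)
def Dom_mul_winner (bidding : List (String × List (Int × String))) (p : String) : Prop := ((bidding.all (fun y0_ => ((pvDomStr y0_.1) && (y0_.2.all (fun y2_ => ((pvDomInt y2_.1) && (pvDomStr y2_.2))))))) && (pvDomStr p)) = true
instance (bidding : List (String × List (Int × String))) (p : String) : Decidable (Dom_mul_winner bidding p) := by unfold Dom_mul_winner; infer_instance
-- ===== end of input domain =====

-- B replaces A's sort-then-filter with one linear max-find pass plus a first-match scan.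
-- (Equivalence is about the return value; neither program mutates its arguments.)

-- ===== PORT A =====
def mul_winner (bidding : List (String × List (Int × String))) (p : String) : Int × String × String :=
  -- max_price = sorted(bidding[p])[::-1]; max_price = max_price[0][0]
  let bp0 := PySem.Dict.getD (PySem.Dict.mk bidding) p []
  let max_price_l := (PySem.List.slice? (PySem.List.sorted2 bp0 (fun x => x.1) (fun x => x.2) false) none none (-1)).getD []
  let max_price := (PySem.List.pyGetD max_price_l 0 (0, "")).1
  -- bp = bidding[p]
  let bp := PySem.Dict.getD (PySem.Dict.mk bidding) p []
  -- winners loop over range(len(bp))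
  let winners := (PySem.List.pyRange 0 (PySem.List.len bp) 1).foldl
      (fun acc i =>
        if (PySem.List.pyGetD bp i (0, "")).1 == max_price then
          acc ++ [((PySem.List.pyGetD bp i (0, "")).1, (PySem.List.pyGetD bp i (0, "")).2, p)]
        else acc) []
  if winners.length > 1 then PySem.List.pyGetD winners 0 (0, "", "")
  else PySem.List.pyGetD winners 0 (0, "", "")

-- ===== PORT B =====
def mul_winner_alt (bidding : List (String × List (Int × String))) (p : String) : Int × String × String :=
  let bp := PySem.Dict.getD (PySem.Dict.mk bidding) p []
  let best := bp.foldl (fun b e => if e.1 > b then e.1 else b) ((PySem.List.pyGetD bp 0 (0, "")).1)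
  -- 'for price, name in bp: if price == best: return (price, name, p)'
  match bp.find? (fun e => e.1 == best) with
  | some e => (e.1, e.2, p)
  | none => (0, "", p)  -- unreachable under Pre_ (the loop always finds the maximum)

-- ===== PRECONDITION & SPEC =====
-- Pre_ excludes exactly the inputs where Python A raises: a missing key p (KeyError)
-- and an empty bid list bidding[p] (IndexError); B raises on the same inputs.
def Pre_mul_winner (bidding : List (String × List (Int × String))) (p : String) : Prop :=
  PySem.Dict.getD (PySem.Dict.mk bidding) p [] ≠ []
instance (bidding : List (String × List (Int × String))) (p : String) : Decidable (Pre_mul_winner bidding p) := by unfold Pre_mul_winner; infer_instance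
def pvWitness_mul_winner : (List (String × List (Int × String))) × String :=
  ([("a", [(1, "w"), (2, "b"), (2, "c")])], "a")

def Spec_mul_winner (bidding : List (String × List (Int × String))) (p : String) (out : Int × String × String) : Prop := out = mul_winner_alt bidding p
instance (bidding : List (String × List (Int × String))) (p : String) (out : Int × String × String) : Decidable (Spec_mul_winner bidding p out) := by unfold Spec_mul_winner; infer_instance

-- ===== CLAIM (what is proved, stated in full; the proofs are below) =====
def Claim_equal_mul_winner : Prop := ∀ (bidding : List (String × List (Int × String))) (p : String), Dom_mul_winner bidding p → Pre_mul_winner bidding p → Spec_mul_winner bidding p (mul_winner bidding p)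

-- ===== LEMMAS AND PROOFS =====

-- the comparison sorted2 uses for these key functions
def pvBefore (a b : Int × String) : Bool :=
  decide (a.1 < b.1) || (!decide (b.1 < a.1) && decide (a.2 < b.2))

theorem pvBefore_true {a b : Int × String} (h : pvBefore a b = true) : a.1 ≤ b.1 := by
  unfold pvBefore at h
  simp only [Bool.or_eq_true, Bool.and_eq_true, Bool.not_eq_true', decide_eq_true_eq,
    decide_eq_false_iff_not] at h
  rcases h with h | ⟨h, _⟩ <;> omega

theorem pvBefore_false {a b : Int × String} (h : pvBefore a b = false) : b.1 ≤ a.1 := by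
  unfold pvBefore at h
  simp only [Bool.or_eq_false_iff, Bool.and_eq_false_iff, Bool.not_eq_false',
    decide_eq_false_iff_not, decide_eq_true_eq] at h
  omega

theorem pairwise_insertBy (x : Int × String) (ys : List (Int × String))
    (h : ys.Pairwise (fun a b => a.1 ≤ b.1)) :
    (PySem.List.insertBy pvBefore x ys).Pairwise (fun a b => a.1 ≤ b.1) := by
  induction ys with
  | nil => simp [PySem.List.insertBy]
  | cons y ys ih =>
    rw [List.pairwise_cons] at h
    by_cases hb : pvBefore x y = true
    · rw [PySem.List.insertBy, if_pos hb]
      have hxy := pvBefore_true hb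
      refine List.Pairwise.cons ?_ (List.Pairwise.cons h.1 h.2)
      intro z hz
      rcases List.mem_cons.1 hz with rfl | hz
      · exact hxy
      · exact le_trans hxy (h.1 z hz)
    · rw [PySem.List.insertBy, if_neg hb]
      have hyx := pvBefore_false (Bool.eq_false_iff.2 hb)
      refine List.Pairwise.cons ?_ (ih h.2)
      intro z hz
      rcases (PySem.List.insertBy_mem_iff _ _ _ _).1 hz with rfl | hz
      · exact hyx
      · exact h.1 z hz

theorem pairwise_foldl_insertBy (l : List (Int × String)) (acc : List (Int × String))
    (h : acc.Pairwise (fun a b => a.1 ≤ b.1)) :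
    (l.foldl (fun acc x => PySem.List.insertBy pvBefore x acc) acc).Pairwise (fun a b => a.1 ≤ b.1) := by
  induction l generalizing acc with
  | nil => exact h
  | cons x l ih => exact ih _ (pairwise_insertBy x acc h)

theorem sorted2_eq_foldl (bp : List (Int × String)) :
    PySem.List.sorted2 bp (fun x => x.1) (fun x => x.2) false
      = bp.foldl (fun acc x => PySem.List.insertBy pvBefore x acc) [] := rfl

theorem pairwise_fst_sorted2 (bp : List (Int × String)) :
    (PySem.List.sorted2 bp (fun x => x.1) (fun x => x.2) false).Pairwise (fun a b => a.1 ≤ b.1) := by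
  rw [sorted2_eq_foldl]
  exact pairwise_foldl_insertBy bp [] List.Pairwise.nil

-- B's fold computes an upper bound of the prices that is itself a price (or the init)
theorem foldl_max_spec (l : List (Int × String)) (init : Int) :
    (l.foldl (fun b e => if e.1 > b then e.1 else b) init = init ∨
      ∃ e ∈ l, l.foldl (fun b e => if e.1 > b then e.1 else b) init = e.1) ∧
    init ≤ l.foldl (fun b e => if e.1 > b then e.1 else b) init ∧
    ∀ e ∈ l, e.1 ≤ l.foldl (fun b e => if e.1 > b then e.1 else b) init := by
  induction l generalizing init with
  | nil => simp
  | cons x l ih =>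
    simp only [List.foldl_cons]
    by_cases hx : x.1 > init
    · rw [if_pos hx]
      obtain ⟨hmem, hle, hub⟩ := ih x.1
      refine ⟨?_, le_trans (le_of_lt hx) hle, ?_⟩
      · rcases hmem with h | ⟨e, he, h⟩
        · exact Or.inr ⟨x, List.mem_cons_self, h⟩
        · exact Or.inr ⟨e, List.mem_cons_of_mem _ he, h⟩
      · intro e he
        rcases List.mem_cons.1 he with rfl | he
        · exact hle
        · exact hub e he
    · rw [if_neg hx]
      obtain ⟨hmem, hle, hub⟩ := ih init
      refine ⟨?_, hle, ?_⟩
      · rcases hmem with h | ⟨e, he, h⟩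
        · exact Or.inl h
        · exact Or.inr ⟨e, List.mem_cons_of_mem _ he, h⟩
      · intro e he
        rcases List.mem_cons.1 he with rfl | he
        · exact le_trans (le_of_not_gt hx) hle
        · exact hub e he

-- ===== VERDICT (by name: the statement is the Claim_ definition above) =====
theorem mul_winner_spec : Claim_equal_mul_winner := by
  intro bidding p _hdom hpre
  unfold Pre_mul_winner at hpre
  unfold Spec_mul_winner mul_winner mul_winner_alt
  set bp := PySem.Dict.getD (PySem.Dict.mk bidding) p [] with hbp
  -- name the sorted list and its reversal
  set s := PySem.List.sorted2 bp (fun x => x.1) (fun x => x.2) false with hs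
  simp only [PySem.List.slice?_none_none_neg_one, Option.getD_some]
  have hperm : s.Perm bp := PySem.List.sorted2_perm bp _ _ false
  have hsne : s ≠ [] := by
    intro h; exact hpre (List.Perm.eq_nil (h ▸ hperm).symm ▸ rfl)
  -- head of the reversed sorted list
  obtain ⟨m, t, hrev⟩ := List.exists_cons_of_ne_nil (fun h => hsne (List.reverse_eq_nil_iff.1 h))
  have hmmem : m ∈ bp := hperm.mem_iff.1 (by rw [← List.mem_reverse, hrev]; exact List.mem_cons_self)
  have hub : ∀ y ∈ bp, y.1 ≤ m.1 := by
    intro y hy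
    have hy' : y ∈ s.reverse := List.mem_reverse.2 (hperm.mem_iff.2 hy)
    rw [hrev] at hy'
    rcases List.mem_cons.1 hy' with rfl | hy'
    · exact le_refl _
    · have hp : (s.reverse).Pairwise (fun a b => b.1 ≤ a.1) := by
        rw [List.pairwise_reverse]; exact pairwise_fst_sorted2 bp
      rw [hrev] at hp
      exact (List.pairwise_cons.1 hp).1 y hy'
  rw [hrev, PySem.List.pyGetD_zero_cons]
  -- B's best equals m.1
  obtain ⟨hbmem, hble, hbub⟩ := foldl_max_spec bp ((PySem.List.pyGetD bp 0 (0, "")).1)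
  set best := bp.foldl (fun b e => if e.1 > b then e.1 else b) ((PySem.List.pyGetD bp 0 (0, "")).1) with hbest
  have hinit_mem : (PySem.List.pyGetD bp 0 (0, "")) ∈ bp := by
    obtain ⟨x, l, hx⟩ := List.exists_cons_of_ne_nil hpre
    rw [hx, PySem.List.pyGetD_zero_cons]; exact List.mem_cons_self
  have hbesteq : best = m.1 := by
    have h1 : best ≤ m.1 := by
      rcases hbmem with h | ⟨e, he, h⟩
      · rw [h]; exact hub _ hinit_mem
      · rw [h]; exact hub e he
    have h2 : m.1 ≤ best := hbub m hmmem
    omega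
  -- A's winners list is the filtered list
  have hwin : (PySem.List.pyRange 0 (PySem.List.len bp) 1).foldl
      (fun acc i =>
        if (PySem.List.pyGetD bp i (0, "")).1 == m.1 then
          acc ++ [((PySem.List.pyGetD bp i (0, "")).1, (PySem.List.pyGetD bp i (0, "")).2, p)]
        else acc) []
      = ((bp.filter (fun e => e.1 == m.1)).map (fun e => (e.1, e.2, p))) := by
    rw [PySem.List.foldl_pyRange_zero_pyGetD bp (0, "")
      (fun acc e => if e.1 == m.1 then acc ++ [(e.1, e.2, p)] else acc) []]
    exact PySem.List.foldl_append_if (fun e => e.1 == m.1) (fun e => (e.1, e.2, p)) bp []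
  rw [hwin, hbesteq]
  -- the filter is nonempty: m witnesses it
  have hfind : bp.find? (fun e => e.1 == m.1) = (bp.filter (fun e => e.1 == m.1)).head? :=
    (List.head?_filter).symm
  obtain ⟨w, ws, hw⟩ : ∃ w ws, bp.filter (fun e => e.1 == m.1) = w :: ws := by
    have : m ∈ bp.filter (fun e => e.1 == m.1) := List.mem_filter.2 ⟨hmmem, by simp⟩
    cases hfl : bp.filter (fun e => e.1 == m.1) with
    | nil => rw [hfl] at this; cases this
    | cons w ws => exact ⟨w, ws, rfl⟩
  rw [hw, hfind, hw]
  simp only [List.map_cons, List.head?_cons]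
  split <;> rw [PySem.List.pyGetD_zero_cons]
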